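-- pv_equiv track=rewrite | github.com/antonykaavya/imitation-game | altego.py | calculatePayoffs
-- ===== SOURCE A (Python) =====
-- def calculatePayoffs(community, C):
--     payoffs = []
--     N = len(community)
--     for i in range(len(community)):
--         leftNeighbor = community[(i-1) % N]
--         rightNeighbor = community[(i+1) % N]
--         # if the agent is an Altruist
--         if community[i] == 1:
--             payoff = leftNeighbor + rightNeighbor - C
--         # if the agent is an Egoist
--         else:
--             payoff = leftNeighbor + rightNeighbor
--         payoffs.append(payoff)
--     return payoffs
-- ===== SOURCE B (Python) =====
-- def calculatePayoffs(community, C):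
--     # Scatter/push algorithm: instead of pulling each agent's two neighbors by
--     # modular indexing, every agent pushes its own value into its two neighbors'
--     # payoff slots; a final pass charges the cost C to the altruists.
--     N = len(community)
--     payoffs = [0] * N
--     for i, a in enumerate(community):
--         payoffs[(i - 1) % N] += a
--         payoffs[(i + 1) % N] += a
--     return [p - C if a == 1 else p for a, p in zip(community, payoffs)]
-- ===== Notes on version B (the rewrite author's own statement) =====
-- stated objective: alternative
-- what changed: Replaces the pull-style loop (each index reads its two neighbors via modular indexing) with a push/scatter algorithm: every agent adds its own value into its two neighbors' payoff slots of a preallocated zero array, and a second pass subtracts the cost C from altruists.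
import Mathlib
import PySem

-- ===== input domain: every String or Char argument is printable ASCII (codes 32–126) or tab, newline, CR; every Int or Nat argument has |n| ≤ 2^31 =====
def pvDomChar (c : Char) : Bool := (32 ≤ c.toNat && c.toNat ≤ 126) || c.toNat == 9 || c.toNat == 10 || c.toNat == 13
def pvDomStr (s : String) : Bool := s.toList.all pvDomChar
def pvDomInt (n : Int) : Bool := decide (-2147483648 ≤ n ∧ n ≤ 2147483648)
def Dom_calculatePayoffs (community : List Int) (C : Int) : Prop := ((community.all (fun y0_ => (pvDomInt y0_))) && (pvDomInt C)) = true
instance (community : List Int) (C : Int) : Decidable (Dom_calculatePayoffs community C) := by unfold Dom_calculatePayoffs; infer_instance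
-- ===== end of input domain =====

-- B replaces A's pull-style modular neighbor reads with a push/scatter algorithm: each agent
-- adds its value into its two neighbors' slots of a zero array, then altruists are charged C
-- (alternative decomposition, same cost).

-- ===== PORT A =====
def calculatePayoffs (community : List Int) (C : Int) : List Int :=
  let N : Int := community.length
  (PySem.List.pyRange 0 N 1).foldl (fun payoffs i =>
    -- community[(i-1) % N]: the index is always in range while the loop runs, so getD's default is dead
    let leftNeighbor := PySem.List.pyGetD community (PySem.Int.mod (i - 1) N) 0
    let rightNeighbor := PySem.List.pyGetD community (PySem.Int.mod (i + 1) N) 0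
    payoffs ++ [if PySem.List.pyGetD community i 0 = 1 then leftNeighbor + rightNeighbor - C
                else leftNeighbor + rightNeighbor]) []

-- ===== PORT B =====
-- loop body of Source B's scatter loop: payoffs[(i-1)%N] += a; payoffs[(i+1)%N] += a
-- (indices are always in range here, so pySetD's clamp-to-self default is dead)
def pvScatterStep (N : Int) (p : List Int) (ia : Int × Int) : List Int :=
  let j1 := PySem.Int.mod (ia.1 - 1) N
  let p1 := PySem.List.pySetD p j1 (PySem.List.pyGetD p j1 0 + ia.2)
  let j2 := PySem.Int.mod (ia.1 + 1) N
  PySem.List.pySetD p1 j2 (PySem.List.pyGetD p1 j2 0 + ia.2)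

def calculatePayoffs_alt (community : List Int) (C : Int) : List Int :=
  let N : Int := community.length
  let payoffs : List Int := List.replicate community.length 0
  let payoffs := (PySem.List.enumerate community 0).foldl (pvScatterStep N) payoffs
  List.zipWith (fun a p => if a = 1 then p - C else p) community payoffs

-- ===== PRECONDITION & SPEC =====
def Spec_calculatePayoffs (community : List Int) (C : Int) (out : List Int) : Prop := out = calculatePayoffs_alt community C
instance (community : List Int) (C : Int) (out : List Int) : Decidable (Spec_calculatePayoffs community C out) := by unfold Spec_calculatePayoffs; infer_instance

-- ===== CLAIM (what is proved, stated in full; the proofs are below) =====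
def Claim_equal_calculatePayoffs : Prop := ∀ (community : List Int) (C : Int), Dom_calculatePayoffs community C → Spec_calculatePayoffs community C (calculatePayoffs community C)

-- ===== LEMMAS AND PROOFS =====

theorem length_pvScatterStep (N : Int) (p : List Int) (ia : Int × Int) :
    (pvScatterStep N p ia).length = p.length := by
  simp [pvScatterStep]

theorem length_scatter (N : Int) (l : List (Int × Int)) (p : List Int) :
    (l.foldl (pvScatterStep N) p).length = p.length := by
  induction l generalizing p with
  | nil => rfl
  | cons x xs ih => simp [List.foldl_cons, ih, length_pvScatterStep]

theorem get_pvScatterStep (N : Int) (p : List Int) (ia : Int × Int)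
    (hN : 0 < N) (hp : (p.length : Int) = N) (k : Nat) :
    PySem.List.pyGetD (pvScatterStep N p ia) (k : Int) 0 =
      PySem.List.pyGetD p (k : Int) 0 +
        ((if PySem.Int.mod (ia.1 - 1) N = (k : Int) then ia.2 else 0) +
         (if PySem.Int.mod (ia.1 + 1) N = (k : Int) then ia.2 else 0)) := by
  have h1n : (0:Int) ≤ PySem.Int.mod (ia.1 - 1) N := PySem.Int.mod_nonneg _ hN
  have h1l : PySem.Int.mod (ia.1 - 1) N < N := PySem.Int.mod_lt _ hN
  have h2n : (0:Int) ≤ PySem.Int.mod (ia.1 + 1) N := PySem.Int.mod_nonneg _ hN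
  have h2l : PySem.Int.mod (ia.1 + 1) N < N := PySem.Int.mod_lt _ hN
  obtain ⟨j1, hj1⟩ : ∃ j : Nat, PySem.Int.mod (ia.1 - 1) N = (j : Int) :=
    ⟨(PySem.Int.mod (ia.1 - 1) N).toNat, (Int.toNat_of_nonneg h1n).symm⟩
  obtain ⟨j2, hj2⟩ : ∃ j : Nat, PySem.Int.mod (ia.1 + 1) N = (j : Int) :=
    ⟨(PySem.Int.mod (ia.1 + 1) N).toNat, (Int.toNat_of_nonneg h2n).symm⟩
  have hj1len : j1 < p.length := by omega
  have hj2len : j2 < p.length := by omega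
  unfold pvScatterStep
  rw [hj1, hj2]
  rw [PySem.List.pyGetD_pySetD_natCast _ _ _ _ _ (by simp; omega),
      PySem.List.pyGetD_pySetD_natCast _ _ _ _ _ (by omega),
      PySem.List.pyGetD_pySetD_natCast _ _ _ _ _ (by omega)]
  have hc : ∀ a b : Nat, ((a:Int) = (b:Int)) = (a = b) := by
    intro a b; simp
  by_cases e1 : k = j2 <;> by_cases e2 : k = j1 <;> by_cases e3 : j2 = j1 <;>
    simp_all <;> omega

theorem get_scatter (N : Int) (l : List (Int × Int)) (p : List Int)
    (hN : 0 < N) (hp : (p.length : Int) = N) (k : Nat) :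
    PySem.List.pyGetD (l.foldl (pvScatterStep N) p) (k : Int) 0 =
      PySem.List.pyGetD p (k : Int) 0 +
        (l.map (fun ia =>
          (if PySem.Int.mod (ia.1 - 1) N = (k : Int) then ia.2 else 0) +
          (if PySem.Int.mod (ia.1 + 1) N = (k : Int) then ia.2 else 0))).sum := by
  induction l generalizing p with
  | nil => simp
  | cons x xs ih =>
    rw [List.foldl_cons, ih (pvScatterStep N p x)
        (by rw [length_pvScatterStep]; exact hp)]
    rw [get_pvScatterStep N p x hN hp k]
    simp [List.sum_cons]
    ring

-- sum of an indicator over List.range n picking out exactly one index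
theorem sum_range_indicator (n i0 : Nat) (hi : i0 < n) (g : Nat → Int)
    (P : Nat → Prop) [DecidablePred P] (hP : ∀ j, j < n → (P j ↔ j = i0)) :
    ((List.range n).map (fun j => if P j then g j else 0)).sum = g i0 := by
  induction n with
  | zero => omega
  | succ m ih =>
    rw [List.range_succ, List.map_append, List.sum_append]
    by_cases hm : i0 = m
    · subst hm
      have hz : ((List.range i0).map (fun j => if P j then g j else 0)).sum = 0 := by
        apply List.sum_eq_zero
        intro x hx
        simp only [List.mem_map, List.mem_range] at hx
        obtain ⟨j, hj, rfl⟩ := hx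
        have : ¬ P j := by
          intro h; have := (hP j (by omega)).mp h; omega
        simp [this]
      rw [hz]
      have : P i0 := (hP i0 (by omega)).mpr rfl
      simp [this]
    · have hi' : i0 < m := by omega
      rw [ih hi' (fun j hj => hP j (by omega))]
      have : ¬ P m := by
        intro h; have := (hP m (by omega)).mp h; omega
      simp [this]

theorem agree (community : List Int) (C : Int) :
    calculatePayoffs community C = calculatePayoffs_alt community C := by
  rcases eq_or_ne community [] with rfl | hne
  · rfl
  · have hn : 0 < community.length := List.length_pos_iff.mpr hne
    have hnpos : (0:Int) < (community.length:Int) := by exact_mod_cast hn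
    -- reduce a Python modular index to an explicit if-form
    have emod_eq : ∀ (a : Int) (m : Nat), m < community.length →
        ((community.length:Int) ∣ (a - (m:Int))) → a % (community.length:Int) = (m:Int) := by
      intro a m hm hd
      calc a % (community.length:Int) = (m:Int) % (community.length:Int) :=
            Int.emod_eq_emod_iff_emod_sub_eq_zero.mpr (Int.emod_eq_zero_of_dvd hd)
        _ = (m:Int) := Int.emod_eq_of_lt (by positivity) (by exact_mod_cast hm)
    have hmodL : ∀ j : Nat, j < community.length →
        PySem.Int.mod ((j:Int) - 1) (community.length:Int) =
          ((if j = 0 then community.length - 1 else j - 1 : Nat) : Int) := by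
      intro j hj
      rw [PySem.Int.mod_eq_emod_of_pos hnpos]
      split
      · exact emod_eq _ _ (by omega)
          ⟨-1, by push_cast [Nat.cast_sub (by omega : 1 ≤ community.length)]; omega⟩
      · exact emod_eq _ _ (by omega) ⟨0, by push_cast [Nat.cast_sub (by omega : 1 ≤ j)]; omega⟩
    have hmodR : ∀ j : Nat, j < community.length →
        PySem.Int.mod ((j:Int) + 1) (community.length:Int) =
          ((if j = community.length - 1 then 0 else j + 1 : Nat) : Int) := by
      intro j hj
      rw [PySem.Int.mod_eq_emod_of_pos hnpos]
      split
      · exact emod_eq _ _ (by omega) ⟨1, by push_cast; omega⟩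
      · exact emod_eq _ _ (by omega) ⟨0, by push_cast; omega⟩
    unfold calculatePayoffs calculatePayoffs_alt
    dsimp only
    rw [PySem.List.foldl_append_singleton_eq_map, PySem.List.pyRange_zero_natCast, List.map_map]
    rw [PySem.List.enumerate_eq_map_pyRange community 0, PySem.List.len_eq]
    set scatter := ((PySem.List.pyRange 0 (community.length:Int) 1).map
        (fun j => (j, PySem.List.pyGetD community j 0))).foldl
        (pvScatterStep (community.length:Int)) (List.replicate community.length 0) with hscat
    have hslen : scatter.length = community.length := by
      rw [hscat, length_scatter]; simp
    apply List.ext_getElem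
    · simp only [List.nil_append, List.length_map, List.length_range, List.length_zipWith,
        hslen]
      omega
    · intro k hk1 hk2
      have hk : k < community.length := by simpa using hk1
      -- the unique source indices that push into slot k
      set l1 : Nat := if k = community.length - 1 then 0 else k + 1 with hl1
      set r1 : Nat := if k = 0 then community.length - 1 else k - 1 with hr1
      have hl1n : l1 < community.length := by rw [hl1]; split <;> omega
      have hr1n : r1 < community.length := by rw [hr1]; split <;> omega
      -- value of scatter at k
      have hscatk : PySem.List.pyGetD scatter (k:Int) 0 =
          community.getD l1 0 + community.getD r1 0 := by
        rw [hscat, get_scatter _ _ _ hnpos (by simp) k]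
        rw [List.map_map]
        have hsplit : ∀ (L : List Int) (f g : Int → Int),
            (L.map (fun x => f x + g x)).sum = (L.map f).sum + (L.map g).sum := by
          intro L f g
          induction L with
          | nil => simp
          | cons y ys ihy => simp [ihy]; ring
        rw [show ((fun ia : Int × Int =>
              (if PySem.Int.mod (ia.1 - 1) (community.length:Int) = (k:Int) then ia.2 else 0) +
              (if PySem.Int.mod (ia.1 + 1) (community.length:Int) = (k:Int) then ia.2 else 0)) ∘
              (fun j : Int => (j, PySem.List.pyGetD community j 0))) =
            (fun j : Int =>
              (if PySem.Int.mod (j - 1) (community.length:Int) = (k:Int)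
                 then PySem.List.pyGetD community j 0 else 0) +
              (if PySem.Int.mod (j + 1) (community.length:Int) = (k:Int)
                 then PySem.List.pyGetD community j 0 else 0))
          from rfl]
        rw [hsplit, PySem.List.pyRange_zero_natCast, List.map_map, List.map_map]
        simp only [Function.comp_def]
        rw [sum_range_indicator community.length l1 hl1n
            (fun j => PySem.List.pyGetD community (j:Int) 0)
            (fun j => PySem.Int.mod ((j:Int) - 1) (community.length:Int) = (k:Int))
            (by
              intro j hj
              dsimp only
              rw [hmodL j hj]
              constructor
              · intro h
                have hjk : (if j = 0 then community.length - 1 else j - 1) = k := by exact_mod_cast h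
                rw [hl1]; split at hjk <;> split <;> omega
              · intro h
                subst h
                have : (if l1 = 0 then community.length - 1 else l1 - 1) = k := by
                  by_cases hkL : k = community.length - 1
                  · have e : l1 = 0 := by rw [hl1, if_pos hkL]
                    rw [e, if_pos rfl]; omega
                  · have e : l1 = k + 1 := by rw [hl1, if_neg hkL]
                    rw [e, if_neg (by omega : ¬ k + 1 = 0)]; omega
                exact_mod_cast this)]
        rw [sum_range_indicator community.length r1 hr1n
            (fun j => PySem.List.pyGetD community (j:Int) 0)
            (fun j => PySem.Int.mod ((j:Int) + 1) (community.length:Int) = (k:Int))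
            (by
              intro j hj
              dsimp only
              rw [hmodR j hj]
              constructor
              · intro h
                have hjk : (if j = community.length - 1 then 0 else j + 1) = k := by exact_mod_cast h
                rw [hr1]; split at hjk <;> split <;> omega
              · intro h
                subst h
                have : (if r1 = community.length - 1 then 0 else r1 + 1) = k := by
                  by_cases hk0 : k = 0
                  · have e : r1 = community.length - 1 := by rw [hr1, if_pos hk0]
                    rw [e, if_pos rfl]; omega
                  · have e : r1 = k - 1 := by rw [hr1, if_neg hk0]
                    rw [e, if_neg (by omega : ¬ k - 1 = community.length - 1)]; omega
                exact_mod_cast this)]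
        simp [PySem.List.pyGetD_natCast]
      -- now compare the k-th entries of both lists
      simp only [List.nil_append, List.getElem_map, List.getElem_range, List.getElem_zipWith,
        Function.comp_apply]
      have hk' : k < community.length := hk
      have hsk : scatter[k]'(by omega) = community.getD l1 0 + community.getD r1 0 := by
        have h := hscatk
        rwa [PySem.List.pyGetD_natCast, List.getD_eq_getElem scatter 0 (by omega)] at h
      rw [hmodL k hk, hmodR k hk, ← hr1, ← hl1, hsk]
      simp only [PySem.List.pyGetD_natCast]
      rw [List.getD_eq_getElem community 0 hk']
      split <;> ring

-- ===== VERDICT (by name: the statement is the Claim_ definition above) =====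
theorem calculatePayoffs_spec : Claim_equal_calculatePayoffs := by
  intro community C _
  unfold Spec_calculatePayoffs
  exact agree community C
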